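-- pv_equiv track=rewrite | github.com/TaishoPharmaceutical/MolDesignPlatform | FragmentAE/FragmentAPI.py | get_smiles_val_core
-- ===== SOURCE A (Python) =====
-- def get_smiles_val_core(smiles, idx):
--     smi = ""
--     count = 0
--     for x in smiles:
--         if x == "*":
--             smi =smi + f"[{idx[count]}*]"
--             count +=1
--         else:
--             smi =smi + x
--
--     return smi
-- ===== SOURCE B (Python) =====
-- def get_smiles_val_core(smiles, idx):
--     parts = smiles.split("*")
--     pieces = [parts[0]]
--     for i, part in enumerate(parts[1:]):
--         pieces.append(f"[{idx[i]}*]")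
--         pieces.append(part)
--     return "".join(pieces)
-- ===== Notes on version B (the rewrite author's own statement) =====
-- stated objective: idiomatic
-- what changed: Instead of scanning character by character with a running star counter and repeated string concatenation, B splits the string on '*' once and interleaves the segments with the indexed wildcard labels, joining the pieces at the end.
import Mathlib
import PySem

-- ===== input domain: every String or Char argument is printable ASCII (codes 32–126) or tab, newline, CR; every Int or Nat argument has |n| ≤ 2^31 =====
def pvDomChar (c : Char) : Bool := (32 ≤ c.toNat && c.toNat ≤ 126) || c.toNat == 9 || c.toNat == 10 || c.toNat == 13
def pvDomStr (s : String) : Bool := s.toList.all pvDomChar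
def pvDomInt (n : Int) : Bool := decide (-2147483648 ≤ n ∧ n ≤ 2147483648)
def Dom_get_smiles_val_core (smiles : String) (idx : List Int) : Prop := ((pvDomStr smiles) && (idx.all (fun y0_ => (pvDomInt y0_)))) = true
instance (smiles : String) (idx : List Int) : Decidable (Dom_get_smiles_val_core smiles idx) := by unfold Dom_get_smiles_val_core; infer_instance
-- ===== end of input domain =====

-- B replaces A's char-by-char scan with a running star counter by split('*') + interleaving
-- the segments with the indexed wildcard labels (more idiomatic; same results).


-- ===== PORT A =====
-- literal port of A: fold over the characters with state (smi, count);
-- idx[count] is PySem.List.pyGetD (in range on every input Pre_ admits; Python raises outside).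
def get_smiles_val_core (smiles : String) (idx : List Int) : String :=
  let r := smiles.toList.foldl
    (fun (st : List Char × Nat) x =>
      if x = '*' then
        (st.1 ++ ('[' :: PySem.Int.toChars (PySem.List.pyGetD idx (st.2 : Int) 0) ++ ['*', ']']), st.2 + 1)
      else (st.1 ++ [x], st.2))
    ([], 0)
  String.ofList r.1

-- ===== PORT B =====
-- literal port of Source B: split on '*', then interleave segments with "[idx[i]*]";
-- the pieces-list + "".join is ported as the equivalent fold that appends each piece in order.
def get_smiles_val_core_alt (smiles : String) (idx : List Int) : String :=
  let parts := PySem.Chars.splitOn smiles.toList ['*']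
  match parts with
  | [] => ""   -- unreachable: str.split always returns at least one piece (parts[0] exists)
  | p0 :: rest =>
    String.ofList ((PySem.List.enumerate rest).foldl
      (fun pieces pi =>
        pieces ++ ('[' :: PySem.Int.toChars (PySem.List.pyGetD idx pi.1 0) ++ ['*', ']']) ++ pi.2)
      p0)

-- ===== PRECONDITION & SPEC =====
-- Pre_ excludes exactly the inputs where Python A raises IndexError: more '*' in smiles than entries in idx.
def Pre_get_smiles_val_core (smiles : String) (idx : List Int) : Prop :=
  smiles.toList.count '*' ≤ idx.length
instance (smiles : String) (idx : List Int) : Decidable (Pre_get_smiles_val_core smiles idx) := by unfold Pre_get_smiles_val_core; infer_instance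
def pvWitness_get_smiles_val_core : String × List Int := ("C*N*O", [5, -3])

def Spec_get_smiles_val_core (smiles : String) (idx : List Int) (out : String) : Prop := out = get_smiles_val_core_alt smiles idx
instance (smiles : String) (idx : List Int) (out : String) : Decidable (Spec_get_smiles_val_core smiles idx out) := by unfold Spec_get_smiles_val_core; infer_instance

-- ===== CLAIM (what is proved, stated in full; the proofs are below) =====
def Claim_equal_get_smiles_val_core : Prop := ∀ (smiles : String) (idx : List Int), Dom_get_smiles_val_core smiles idx → Pre_get_smiles_val_core smiles idx → Spec_get_smiles_val_core smiles idx (get_smiles_val_core smiles idx)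

-- ===== LEMMAS AND PROOFS =====

-- structural characterisation of splitting on '*': pre is the segment gathered so far
def pvSplit (pre : List Char) : List Char → List (List Char)
  | [] => [pre]
  | c :: rest => if c = '*' then pre :: pvSplit [] rest else pvSplit (pre ++ [c]) rest

-- the common result, written structurally: k = how many stars were already consumed
def pvOut (idx : List Int) (k : Nat) : List Char → List Char
  | [] => []
  | c :: rest =>
    if c = '*' then
      ('[' :: PySem.Int.toChars (PySem.List.pyGetD idx (k : Int) 0) ++ ['*', ']']) ++ pvOut idx (k+1) rest
    else c :: pvOut idx k rest

lemma pvSplit_ne_nil (l pre : List Char) : pvSplit pre l ≠ [] := by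
  induction l generalizing pre with
  | nil => simp [pvSplit]
  | cons c rest ih =>
    by_cases h : c = '*' <;> simp [pvSplit, h, ih]

lemma go_eq_pvSplit (fuel : Nat) (l cur : List Char) (acc : List (List Char))
    (h : l.length ≤ fuel) :
    PySem.Chars.splitOn.go ['*'] fuel l cur acc = acc.reverse ++ pvSplit cur.reverse l := by
  induction fuel generalizing l cur acc with
  | zero =>
    have : l = [] := by cases l <;> simp_all
    subst this
    simp [PySem.Chars.splitOn.go, pvSplit]
  | succ n ih =>
    cases l with
    | nil => simp [PySem.Chars.splitOn.go, pvSplit]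
    | cons c rest =>
      by_cases hc : c = '*'
      · subst hc
        rw [show PySem.Chars.splitOn.go ['*'] (n+1) ('*' :: rest) cur acc
              = PySem.Chars.splitOn.go ['*'] n rest [] (cur.reverse :: acc) by
            simp [PySem.Chars.splitOn.go, List.isPrefixOf]]
        rw [ih rest [] (cur.reverse :: acc) (by simpa using Nat.le_of_succ_le_succ (by simpa using h))]
        simp [pvSplit]
      · rw [show PySem.Chars.splitOn.go ['*'] (n+1) (c :: rest) cur acc
              = PySem.Chars.splitOn.go ['*'] n rest (c :: cur) acc by
            simp only [PySem.Chars.splitOn.go, List.isPrefixOf]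
            rw [if_neg]
            simp only [Bool.and_eq_true, beq_iff_eq, and_true]
            intro heq
            exact absurd heq.symm hc]
        rw [ih rest (c :: cur) acc (by simpa using Nat.le_of_succ_le_succ (by simpa using h))]
        simp [pvSplit, hc]

lemma splitOn_eq_pvSplit (l : List Char) :
    PySem.Chars.splitOn l ['*'] = pvSplit [] l := by
  have := go_eq_pvSplit (l.length + 1) l [] [] (by omega)
  simpa [PySem.Chars.splitOn] using this

lemma pvSplit_cons (pre : List Char) (c : Char) (rest : List Char) :
    pvSplit pre (c :: rest) = if c = '*' then pre :: pvSplit [] rest else pvSplit (pre ++ [c]) rest := rfl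

lemma pvOut_cons (idx : List Int) (k : Nat) (c : Char) (rest : List Char) :
    pvOut idx k (c :: rest) =
      if c = '*' then
        ('[' :: PySem.Int.toChars (PySem.List.pyGetD idx (k : Int) 0) ++ ['*', ']']) ++ pvOut idx (k+1) rest
      else c :: pvOut idx k rest := rfl

lemma foldA_eq_pvOut (idx : List Int) (l : List Char) : ∀ (s : List Char) (k : Nat),
    (l.foldl
      (fun (st : List Char × Nat) x =>
        if x = '*' then
          (st.1 ++ ('[' :: PySem.Int.toChars (PySem.List.pyGetD idx (st.2 : Int) 0) ++ ['*', ']']), st.2 + 1)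
        else (st.1 ++ [x], st.2))
      (s, k)).1 = s ++ pvOut idx k l := by
  induction l with
  | nil => intro s k; simp [pvOut]
  | cons c rest ih =>
    intro s k
    by_cases hc : c = '*'
    · subst hc
      simp only [List.foldl_cons]
      rw [ih, pvOut_cons, if_pos rfl]
      simp
    · simp only [List.foldl_cons, if_neg hc]
      rw [ih, pvOut_cons, if_neg hc]
      simp

lemma foldB_eq_pvOut (idx : List Int) (l : List Char) :
    ∀ (pre : List Char) (k : Nat) (acc q0 : List Char) (qs : List (List Char)),
    pvSplit pre l = q0 :: qs →
    ((PySem.List.enumerate qs (k : Int)).foldl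
      (fun pieces pi =>
        pieces ++ ('[' :: PySem.Int.toChars (PySem.List.pyGetD idx pi.1 0) ++ ['*', ']']) ++ pi.2)
      (acc ++ q0)) = acc ++ pre ++ pvOut idx k l := by
  induction l with
  | nil =>
    intro pre k acc q0 qs hq
    simp only [pvSplit] at hq
    obtain ⟨h1, h2⟩ := List.cons.inj hq
    subst h1; subst h2
    simp [pvOut]
  | cons c rest ih =>
    intro pre k acc q0 qs hq
    by_cases hc : c = '*'
    · subst hc
      rw [pvSplit_cons, if_pos rfl] at hq
      obtain ⟨h1, h2⟩ := List.cons.inj hq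
      subst h1
      obtain ⟨r0, rs, hr⟩ : ∃ r0 rs, pvSplit ([] : List Char) rest = r0 :: rs := by
        cases h : pvSplit ([] : List Char) rest with
        | nil => exact absurd h (pvSplit_ne_nil rest [])
        | cons r0 rs => exact ⟨r0, rs, rfl⟩
      subst h2
      rw [hr]
      simp only [PySem.List.enumerate, List.foldl_cons]
      have := ih [] (k+1)
        ((acc ++ pre) ++ ('[' :: PySem.Int.toChars (PySem.List.pyGetD idx (k : Int) 0) ++ ['*', ']']))
        r0 rs hr
      simp only [Nat.cast_add, Nat.cast_one] at this
      rw [show ((acc ++ pre) ++ ('[' :: PySem.Int.toChars (PySem.List.pyGetD idx (k : Int) 0) ++ ['*', ']']) ++ r0)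
            = (((acc ++ pre) ++ ('[' :: PySem.Int.toChars (PySem.List.pyGetD idx (k : Int) 0) ++ ['*', ']'])) ++ r0) by simp]
      rw [this, pvOut_cons, if_pos rfl]
      simp
    · rw [pvSplit_cons, if_neg hc] at hq
      rw [ih (pre ++ [c]) k acc q0 qs hq, pvOut_cons, if_neg hc]
      simp

-- ===== VERDICT (by name: the statement is the Claim_ definition above) =====
theorem get_smiles_val_core_spec : Claim_equal_get_smiles_val_core := by
  intro smiles idx _ _
  show get_smiles_val_core smiles idx = get_smiles_val_core_alt smiles idx
  unfold get_smiles_val_core get_smiles_val_core_alt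
  cases h : pvSplit ([] : List Char) smiles.toList with
  | nil => exact absurd h (pvSplit_ne_nil smiles.toList [])
  | cons p0 rest =>
    have hA := foldA_eq_pvOut idx smiles.toList [] 0
    have hB := foldB_eq_pvOut idx smiles.toList [] 0 [] p0 rest h
    simp only [splitOn_eq_pvSplit, h, hA]
    simp only [List.nil_append, Nat.cast_zero] at hB ⊢
    rw [← hB]
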